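-- pv_equiv track=rewrite | github.com/oasis-tcs/csaf | csaf_2.1/prose/edit/bin/validate-outlines.py | yaml_leaf_types
-- ===== SOURCE A (Python) =====
-- COLON = ':'
--
-- def yaml_leaf_types(yaml_lines: list[str]) -> list[tuple[str, str]]:
--     """Naive sequence of leaf-type pairs extractor."""
--     indents = []
--     for line in yaml_lines:
--         indent = 0
--         if COLON in line:
--             indent = len(line) - len(line.lstrip())
--         indents.append(indent)
--     leaf_indent = max(indents)
--
--     collected: list[tuple[str, str]] = []
--     for indent, line in zip(indents, yaml_lines):
--         if indent < leaf_indent: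
--             continue
--         leaf, leaf_type = line.strip().split(COLON)
--         collected.append((leaf, leaf_type.strip()))
--
--     return collected
-- ===== SOURCE B (Python) =====
-- COLON = ':'
--
-- def yaml_leaf_types(yaml_lines: list[str]) -> list[tuple[str, str]]:
--     """One-pass deepest-group collector: track the running max indent and
--     the lines at it, then parse only that group."""
--     best = -1
--     deepest: list[str] = []
--     for line in yaml_lines:
--         ind = (len(line) - len(line.lstrip())) if COLON in line else 0
--         if best < ind:
--             best, deepest = ind, [line]
--         elif ind == best:
--             deepest.append(line)
--     out: list[tuple[str, str]] = []
--     for line in deepest: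
--         leaf, leaf_type = line.strip().split(COLON)
--         out.append((leaf, leaf_type.strip()))
--     return out
-- ===== Notes on version B (the rewrite author's own statement) =====
-- stated objective: alternative
-- what changed: B replaces A's two passes (materialise an indents list, take its max, then rescan the zipped lists) with a single online pass that keeps the running maximum indent and the lines at it, parsing only that deepest group at the end.
-- outside the precondition, e.g. on yaml_leaf_types([]): A raises ValueError, B returns []
import Mathlib
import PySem

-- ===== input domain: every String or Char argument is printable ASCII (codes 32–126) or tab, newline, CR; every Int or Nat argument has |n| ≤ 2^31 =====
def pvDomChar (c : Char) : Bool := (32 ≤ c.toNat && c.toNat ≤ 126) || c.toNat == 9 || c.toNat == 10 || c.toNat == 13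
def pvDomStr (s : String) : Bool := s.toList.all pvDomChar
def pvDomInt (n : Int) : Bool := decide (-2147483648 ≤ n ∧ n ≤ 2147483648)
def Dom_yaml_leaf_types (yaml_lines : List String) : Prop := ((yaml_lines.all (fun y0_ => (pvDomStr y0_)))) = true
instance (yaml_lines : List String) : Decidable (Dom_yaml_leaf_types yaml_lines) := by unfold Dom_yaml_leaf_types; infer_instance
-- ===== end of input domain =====

-- B makes one online pass (running max indent + lines at it) instead of A's two passes; return values proved equal on Pre_.

-- ===== PORT A =====
def yaml_leaf_types (yaml_lines : List String) : List (String × String) :=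
  let indents : List Int := yaml_lines.foldl (fun acc line =>
    let indent : Int :=
      if PySem.Str.isIn ":" line then
        PySem.Str.len line - PySem.Str.len (PySem.Str.lstrip line)
      else 0
    acc ++ [indent]) []
  match PySem.List.max? indents (fun y => y) with
  | none => []   -- Python: max([]) raises ValueError; excluded by Pre_
  | some leaf_indent =>
    (indents.zip yaml_lines).foldl (fun collected p =>
      if p.1 < leaf_indent then collected
      else
        match PySem.Str.split? (PySem.Str.strip p.2) ":" with
        | some [leaf, leaf_type] => collected ++ [(leaf, PySem.Str.strip leaf_type)]
        | _ => collected   -- Python: tuple-unpack raises ValueError; excluded by Pre_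
      ) []

-- ===== PORT B =====
def yaml_leaf_types_alt (yaml_lines : List String) : List (String × String) :=
  let st : Int × List String := yaml_lines.foldl (fun (st : Int × List String) line =>
      let ind : Int :=
        if PySem.Str.isIn ":" line then
          PySem.Str.len line - PySem.Str.len (PySem.Str.lstrip line)
        else 0
      if st.1 < ind then (ind, [line])
      else if ind = st.1 then (st.1, st.2 ++ [line])
      else st) (-1, [])
  st.2.foldl (fun out line =>
    let parts := (PySem.Str.split? (PySem.Str.strip line) ":").getD []
    if parts.length = 2 then
      out ++ [(parts.getD 0 "", PySem.Str.strip (parts.getD 1 ""))]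
    else out) []   -- length ≠ 2: Python's tuple-unpack raises ValueError; excluded by Pre_

-- ===== PRECONDITION & SPEC =====
-- The per-line indent A assigns (0 unless the line contains a colon).
def pvInd (line : String) : Int :=
  if PySem.Str.isIn ":" line then
    PySem.Str.len line - PySem.Str.len (PySem.Str.lstrip line)
  else 0

def pvMaxInd (yaml_lines : List String) : Int :=
  (yaml_lines.map pvInd).foldl max 0

-- Pre_ excludes exactly the inputs on which the Python A raises ValueError:
-- the empty list (max([])), and inputs where some deepest-indent line does not
-- contain exactly one colon (the two-variable unpack of split fails).
def Pre_yaml_leaf_types (yaml_lines : List String) : Prop :=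
  yaml_lines ≠ [] ∧
  ∀ line ∈ yaml_lines, pvInd line = pvMaxInd yaml_lines → PySem.Str.count line ":" = 1
instance (yaml_lines : List String) : Decidable (Pre_yaml_leaf_types yaml_lines) := by
  unfold Pre_yaml_leaf_types; infer_instance

def pvWitness_yaml_leaf_types : List String := ["a: b", "  x: y"]

def Spec_yaml_leaf_types (yaml_lines : List String) (out : List (String × String)) : Prop := out = yaml_leaf_types_alt yaml_lines
instance (yaml_lines : List String) (out : List (String × String)) : Decidable (Spec_yaml_leaf_types yaml_lines out) := by unfold Spec_yaml_leaf_types; infer_instance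

-- ===== CLAIM (what is proved, stated in full; the proofs are below) =====
def Claim_equal_yaml_leaf_types : Prop := ∀ (yaml_lines : List String), Dom_yaml_leaf_types yaml_lines → Pre_yaml_leaf_types yaml_lines → Spec_yaml_leaf_types yaml_lines (yaml_leaf_types yaml_lines)

-- ===== LEMMAS AND PROOFS =====

-- the shared parse step, as a per-line list ([] where Python would raise)
def pvParse (line : String) : List (String × String) :=
  match PySem.Str.split? (PySem.Str.strip line) ":" with
  | some [leaf, leaf_type] => [(leaf, PySem.Str.strip leaf_type)]
  | _ => []

theorem pvInd_nonneg (line : String) : 0 ≤ pvInd line := by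
  unfold pvInd
  split
  · have h := PySem.Str.len_eq line
    have h2 := PySem.Str.len_eq (PySem.Str.lstrip line)
    rw [h, h2, PySem.Str.toList_lstrip, PySem.Chars.lstrip]
    have := List.length_dropWhile_le PySem.Chars.isspace line.toList
    omega
  · exact le_refl 0

theorem foldA_skip (M : Int) (xs : List String) (acc : List (String × String)) :
    xs.foldl (fun c x => if pvInd x < M then c else c ++ pvParse x) acc
      = acc ++ (xs.filter (fun x => decide ¬ (pvInd x < M))).flatMap pvParse := by
  induction xs generalizing acc with
  | nil => simp
  | cons h t ih =>
    by_cases hc : pvInd h < M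
    · simp [List.foldl_cons, hc, ih]
    · have hle : M ≤ pvInd h := not_lt.mp hc
      simp [List.foldl_cons, hc, ih, hle]

theorem foldB_inv (xs : List String) (m : Int) (acc : List String) :
    xs.foldl (fun (st : Int × List String) line =>
        if st.1 < pvInd line then (pvInd line, [line])
        else if pvInd line = st.1 then (st.1, st.2 ++ [line])
        else st) (m, acc)
      = ((xs.map pvInd).foldl max m,
         (if m = (xs.map pvInd).foldl max m then acc else [])
           ++ xs.filter (fun l => decide (pvInd l = (xs.map pvInd).foldl max m))) := by
  induction xs generalizing m acc with
  | nil => simp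
  | cons h t ih =>
    have hfold : ((h :: t).map pvInd).foldl max m = (t.map pvInd).foldl max (max m (pvInd h)) := by
      simp [List.map_cons, List.foldl_cons]
    by_cases hm : m < pvInd h
    · have hmax : max m (pvInd h) = pvInd h := max_eq_right hm.le
      have hle := (PySem.List.le_foldl_max (t.map pvInd) (pvInd h)).1
      have hne : m ≠ (t.map pvInd).foldl max (pvInd h) := by omega
      simp only [List.foldl_cons, hm, if_true, ih, hfold, hmax, List.filter_cons]
      rw [if_neg hne]
      by_cases hh : pvInd h = (t.map pvInd).foldl max (pvInd h)
      · rw [if_pos hh, decide_eq_true hh, if_pos rfl]; simp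
      · rw [if_neg hh, decide_eq_false hh]; simp
    · by_cases he : pvInd h = m
      · have hmax : max m (pvInd h) = m := max_eq_left (le_of_eq he)
        simp only [List.foldl_cons, he, lt_self_iff_false, if_false, if_true,
          max_self, ih, hfold, List.filter_cons]
        by_cases hh : m = (t.map pvInd).foldl max m
        · rw [decide_eq_true hh, if_pos rfl, if_pos hh, if_pos hh]; simp
        · rw [decide_eq_false hh]; simp [if_neg hh]
      · have hmax : max m (pvInd h) = m := max_eq_left (by omega)
        have hle := (PySem.List.le_foldl_max (t.map pvInd) m).1
        have hh : ¬ pvInd h = (t.map pvInd).foldl max m := by omega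
        simp only [List.foldl_cons, hm, if_false, he, ih, hfold, hmax, List.filter_cons]
        rw [decide_eq_false hh]; simp

theorem parse_step (c : List (String × String)) (line : String) :
    (match PySem.Str.split? (PySem.Str.strip line) ":" with
     | some [leaf, leaf_type] => c ++ [(leaf, PySem.Str.strip leaf_type)]
     | _ => c) = c ++ pvParse line := by
  unfold pvParse
  split <;> simp_all

theorem yaml_leaf_types_spec : Claim_equal_yaml_leaf_types := by
  intro xs _ hpre
  unfold Spec_yaml_leaf_types yaml_leaf_types yaml_leaf_types_alt
  obtain ⟨hne, -⟩ := hpre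
  cases xs with
  | nil => exact absurd rfl hne
  | cons x t =>
    simp only []
    -- the indent lambdas of both ports are definitionally pvInd
    have hA : (fun (acc : List Int) (line : String) =>
        acc ++ [(if PySem.Str.isIn ":" line then
            PySem.Str.len line - PySem.Str.len (PySem.Str.lstrip line) else 0 : Int)])
        = fun acc line => acc ++ [pvInd line] := rfl
    rw [hA, PySem.List.foldl_append_singleton_eq_map pvInd (x :: t) []]
    simp only [List.nil_append]
    rw [List.map_cons, PySem.List.max?_id_cons]
    set M := ((t.map pvInd).foldl max (pvInd x)) with hM
    have hub : ∀ l ∈ x :: t, pvInd l ≤ M := by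
      intro l hl
      have h1 := (PySem.List.le_foldl_max (t.map pvInd) (pvInd x)).1
      have h2 := (PySem.List.le_foldl_max (t.map pvInd) (pvInd x)).2
      rw [List.mem_cons] at hl
      rcases hl with rfl | hl
      · exact h1
      · exact h2 _ (List.mem_map_of_mem hl)
    -- A side: the zipped second loop is a filter + flatMap
    have hzip : ∀ (l : List String), (l.map pvInd).zip l = l.map (fun a => (pvInd a, a)) := by
      intro l
      induction l with
      | nil => simp
      | cons a l ih => simp [ih]
    rw [← List.map_cons]
    split
    · rename_i hnone
      exact absurd hnone (by simp)
    rename_i leaf_indent hsome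
    rw [Option.some_inj] at hsome
    subst hsome
    rw [hzip, List.foldl_map]
    have hAstep : (fun (c : List (String × String)) (y : String) =>
        if (pvInd y, y).1 < M then c
        else match PySem.Str.split? (PySem.Str.strip (pvInd y, y).2) ":" with
          | some [leaf, leaf_type] => c ++ [(leaf, PySem.Str.strip leaf_type)]
          | _ => c)
        = fun c l => if pvInd l < M then c else c ++ pvParse l := by
      funext c l
      by_cases hc : pvInd l < M
      · simp [hc]
      · simp only [hc, if_false]
        exact parse_step c l
    rw [hAstep, foldA_skip]
    -- B side: the one-pass fold, then the parse loop on the deepest group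
    have hB : (fun (st : Int × List String) (line : String) =>
        let ind : Int := if PySem.Str.isIn ":" line then
            PySem.Str.len line - PySem.Str.len (PySem.Str.lstrip line) else 0
        if st.1 < ind then (ind, [line])
        else if ind = st.1 then (st.1, st.2 ++ [line])
        else st)
        = fun (st : Int × List String) line =>
            if st.1 < pvInd line then (pvInd line, [line])
            else if pvInd line = st.1 then (st.1, st.2 ++ [line])
            else st := rfl
    rw [hB, foldB_inv]
    have hM' : ((x :: t).map pvInd).foldl max (-1) = M := by
      have hx := pvInd_nonneg x
      simp only [List.map_cons, List.foldl_cons]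
      rw [max_eq_right (by omega : (-1 : Int) ≤ pvInd x)]
    have hne1 : ¬ ((-1 : Int) = ((x :: t).map pvInd).foldl max (-1)) := by
      rw [hM']
      have hx := pvInd_nonneg x
      have h1 := (PySem.List.le_foldl_max (t.map pvInd) (pvInd x)).1
      omega
    rw [if_neg hne1, hM']
    have hBstep : (fun (out : List (String × String)) (line : String) =>
        let parts := (PySem.Str.split? (PySem.Str.strip line) ":").getD []
        if parts.length = 2 then
          out ++ [(parts.getD 0 "", PySem.Str.strip (parts.getD 1 ""))]
        else out)
        = fun out line => out ++ pvParse line := by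
      funext c l
      rcases h : PySem.Str.split? (PySem.Str.strip l) ":" with _ | parts
      · simp [pvParse, h]
      · rcases parts with _ | ⟨a, _ | ⟨b, _ | _⟩⟩ <;> simp [pvParse, h]
    simp only [List.nil_append, hBstep]
    rw [PySem.List.foldl_append_eq_flatMap]
    congr 1
    apply List.filter_congr
    intro l hl
    have := hub l hl
    simp only [decide_eq_decide]
    omega
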